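-- pv_equiv track=rewrite | github.com/CarlEkerot/aoc2016 | 15.py | solve
-- ===== SOURCE A (Python) =====
-- def solve(t):
--     eqs = [
--         (t + 10 + 0) % 13,
--         (t + 15 + 1) % 17,
--         (t + 17 + 2) % 19,
--         (t +  1 + 3) % 7,
--         (t +  0 + 4) % 5,
--         (t +  1 + 5) % 3
--     ]
--     return not any([eq != 0 for eq in eqs])
-- ===== SOURCE B (Python) =====
-- def solve(t):
--     # The six congruences form a CRT system over coprime moduli 13,17,19,7,5,3;
--     # its unique solution modulo 13*17*19*7*5*3 = 440895 is 203661.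
--     return t % 440895 == 203661
-- ===== Notes on version B (the rewrite author's own statement) =====
-- stated objective: simpler
-- what changed: Replaced the six separate modular zero-checks by the single CRT congruence t % 440895 == 203661 (the unique solution of the system modulo the product of the coprime moduli).
import Mathlib
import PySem

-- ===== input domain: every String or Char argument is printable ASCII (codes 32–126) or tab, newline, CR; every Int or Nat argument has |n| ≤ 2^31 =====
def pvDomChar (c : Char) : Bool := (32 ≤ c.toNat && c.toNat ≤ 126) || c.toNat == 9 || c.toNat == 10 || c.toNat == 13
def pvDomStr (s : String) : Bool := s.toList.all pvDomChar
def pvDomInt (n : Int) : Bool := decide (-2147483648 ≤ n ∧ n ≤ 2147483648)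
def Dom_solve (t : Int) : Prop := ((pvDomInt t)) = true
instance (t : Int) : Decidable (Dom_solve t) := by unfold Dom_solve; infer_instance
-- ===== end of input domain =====

-- B replaces A's six separate modular zero-checks with the single equivalent CRT congruence t % 440895 == 203661 (simpler).


-- ===== PORT A =====
def solve (t : Int) : Bool :=
  let eqs : List Int :=
    [ PySem.Int.mod (t + 10 + 0) 13,
      PySem.Int.mod (t + 15 + 1) 17,
      PySem.Int.mod (t + 17 + 2) 19,
      PySem.Int.mod (t +  1 + 3) 7,
      PySem.Int.mod (t +  0 + 4) 5,
      PySem.Int.mod (t +  1 + 5) 3 ]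
  !((eqs.map (fun eq => eq != 0)).any id)

-- ===== PORT B =====
def solve_alt (t : Int) : Bool := PySem.Int.mod t 440895 == 203661

-- ===== PRECONDITION & SPEC =====
def Spec_solve (t : Int) (out : Bool) : Prop := out = solve_alt t
instance (t : Int) (out : Bool) : Decidable (Spec_solve t out) := by unfold Spec_solve; infer_instance

-- ===== CLAIM (what is proved, stated in full; the proofs are below) =====
def Claim_equal_solve : Prop := ∀ (t : Int), Dom_solve t → Spec_solve t (solve t)

-- ===== LEMMAS AND PROOFS =====
theorem crt_dvd (x : Int) (h13 : (13:Int) ∣ x) (h17 : (17:Int) ∣ x) (h19 : (19:Int) ∣ x)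
    (h7 : (7:Int) ∣ x) (h5 : (5:Int) ∣ x) (h3 : (3:Int) ∣ x) : (440895:Int) ∣ x := by
  have c1 : IsCoprime (13:Int) 17 := Int.isCoprime_iff_gcd_eq_one.mpr (by decide)
  have c2 : IsCoprime (221:Int) 19 := Int.isCoprime_iff_gcd_eq_one.mpr (by decide)
  have c3 : IsCoprime (4199:Int) 7 := Int.isCoprime_iff_gcd_eq_one.mpr (by decide)
  have c4 : IsCoprime (29393:Int) 5 := Int.isCoprime_iff_gcd_eq_one.mpr (by decide)
  have c5 : IsCoprime (146965:Int) 3 := Int.isCoprime_iff_gcd_eq_one.mpr (by decide)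
  have d1 : (221:Int) ∣ x := by have := c1.mul_dvd h13 h17; norm_num at this; exact this
  have d2 : (4199:Int) ∣ x := by have := c2.mul_dvd d1 h19; norm_num at this; exact this
  have d3 : (29393:Int) ∣ x := by have := c3.mul_dvd d2 h7; norm_num at this; exact this
  have d4 : (146965:Int) ∣ x := by have := c4.mul_dvd d3 h5; norm_num at this; exact this
  have d5 := c5.mul_dvd d4 h3
  norm_num at d5; exact d5

theorem fwd13 (t : Int) (h : (t + 10 + 0) % 13 = 0) : (13:Int) ∣ (t - 203661) := by omega
theorem fwd17 (t : Int) (h : (t + 15 + 1) % 17 = 0) : (17:Int) ∣ (t - 203661) := by omega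
theorem fwd19 (t : Int) (h : (t + 17 + 2) % 19 = 0) : (19:Int) ∣ (t - 203661) := by omega
theorem fwd7  (t : Int) (h : (t + 1 + 3) % 7 = 0)  : (7:Int)  ∣ (t - 203661) := by omega
theorem fwd5  (t : Int) (h : (t + 0 + 4) % 5 = 0)  : (5:Int)  ∣ (t - 203661) := by omega
theorem fwd3  (t : Int) (h : (t + 1 + 5) % 3 = 0)  : (3:Int)  ∣ (t - 203661) := by omega
theorem fwdP  (t : Int) (h : (440895:Int) ∣ (t - 203661)) : t % 440895 = 203661 := by omega
theorem bwdP  (t : Int) (h : t % 440895 = 203661) : (440895:Int) ∣ (t - 203661) := by omega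
theorem bwd13 (t : Int) (h : (13:Int) ∣ (t - 203661)) : (t + 10 + 0) % 13 = 0 := by omega
theorem bwd17 (t : Int) (h : (17:Int) ∣ (t - 203661)) : (t + 15 + 1) % 17 = 0 := by omega
theorem bwd19 (t : Int) (h : (19:Int) ∣ (t - 203661)) : (t + 17 + 2) % 19 = 0 := by omega
theorem bwd7  (t : Int) (h : (7:Int)  ∣ (t - 203661)) : (t + 1 + 3) % 7 = 0  := by omega
theorem bwd5  (t : Int) (h : (5:Int)  ∣ (t - 203661)) : (t + 0 + 4) % 5 = 0  := by omega
theorem bwd3  (t : Int) (h : (3:Int)  ∣ (t - 203661)) : (t + 1 + 5) % 3 = 0  := by omega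

theorem solve_eq_alt (t : Int) : solve t = solve_alt t := by
  have h13 := PySem.Int.mod_eq_emod_of_pos (a := t + 10 + 0) (by norm_num : (0:Int) < 13)
  have h17 := PySem.Int.mod_eq_emod_of_pos (a := t + 15 + 1) (by norm_num : (0:Int) < 17)
  have h19 := PySem.Int.mod_eq_emod_of_pos (a := t + 17 + 2) (by norm_num : (0:Int) < 19)
  have h7  := PySem.Int.mod_eq_emod_of_pos (a := t + 1 + 3)  (by norm_num : (0:Int) < 7)
  have h5  := PySem.Int.mod_eq_emod_of_pos (a := t + 0 + 4)  (by norm_num : (0:Int) < 5)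
  have h3  := PySem.Int.mod_eq_emod_of_pos (a := t + 1 + 5)  (by norm_num : (0:Int) < 3)
  have hP  := PySem.Int.mod_eq_emod_of_pos (a := t)          (by norm_num : (0:Int) < 440895)
  rw [Bool.eq_iff_iff]
  simp only [solve, solve_alt, h13, h17, h19, h7, h5, h3, hP, List.map, List.any, id_eq,
    Bool.not_eq_true', Bool.or_eq_false_iff, bne_eq_false_iff_eq, beq_iff_eq]
  constructor
  · rintro ⟨a13, a17, a19, a7, a5, a3, -⟩
    exact fwdP t (crt_dvd _ (fwd13 t a13) (fwd17 t a17) (fwd19 t a19)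
      (fwd7 t a7) (fwd5 t a5) (fwd3 t a3))
  · intro h
    have hd := bwdP t h
    exact ⟨bwd13 t (dvd_trans (by norm_num) hd), bwd17 t (dvd_trans (by norm_num) hd),
      bwd19 t (dvd_trans (by norm_num) hd), bwd7 t (dvd_trans (by norm_num) hd),
      bwd5 t (dvd_trans (by norm_num) hd), bwd3 t (dvd_trans (by norm_num) hd), trivial⟩

-- ===== VERDICT (by name: the statement is the Claim_ definition above) =====
theorem solve_spec : Claim_equal_solve := by
  intro t _
  exact solve_eq_alt t
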